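-- pv_equiv track=rewrite | github.com/DongYun666/leetcode | 899.有序队列.py | orderlyQueue
-- ===== SOURCE A (Python) =====
-- def orderlyQueue(s: str, k: int) -> str:
--     if k != 1:
--         return "".join(sorted(s))
--     else:
--         temp = s+s
--         min_ = s
--         for i in range(len(s)):
--             min_ = min(min_,temp[i:i+len(s)])
--         return min_
-- ===== SOURCE B (Python) =====
-- def orderlyQueue(s: str, k: int) -> str:
--     if k != 1:
--         return "".join(sorted(s))
--     n = len(s)
--     if n == 0:
--         return s
--     # Position-by-position elimination: keep the rotation start indices whose
--     # rotation prefix is minimal, refining one character position at a time.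
--     cand = list(range(n))
--     for p in range(n):
--         m = min(s[(i + p) % n] for i in cand)
--         cand = [i for i in cand if s[(i + p) % n] == m]
--     i = cand[0]
--     return s[i:] + s[:i]
-- ===== Notes on version B (the rewrite author's own statement) =====
-- stated objective: alternative
-- what changed: For k==1, instead of taking the minimum of all n length-n windows of the doubled string s+s, B eliminates rotation start indices position by position: it keeps a candidate list of starts and, for each character position p, retains only the candidates whose p-th rotation character is minimal, so whole rotations are never materialised or compared.
import Mathlib
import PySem

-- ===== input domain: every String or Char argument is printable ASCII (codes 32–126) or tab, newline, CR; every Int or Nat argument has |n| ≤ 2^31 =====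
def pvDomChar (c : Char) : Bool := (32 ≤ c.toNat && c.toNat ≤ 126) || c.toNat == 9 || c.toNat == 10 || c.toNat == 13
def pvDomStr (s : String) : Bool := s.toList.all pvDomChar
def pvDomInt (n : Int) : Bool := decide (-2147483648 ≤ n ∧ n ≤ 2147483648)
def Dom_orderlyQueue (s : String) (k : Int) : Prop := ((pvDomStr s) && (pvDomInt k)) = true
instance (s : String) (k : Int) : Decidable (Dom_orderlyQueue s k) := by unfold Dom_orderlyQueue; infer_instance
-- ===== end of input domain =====

-- B replaces A's scan of all n length-n windows of the doubled string by position-by-position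
-- elimination of rotation start indices (keep only the starts whose rotation prefix is minimal,
-- one character position at a time); objective: alternative.

-- ===== PORT A =====
def orderlyQueue (s : String) (k : Int) : String :=
  if k ≠ 1 then
    String.ofList (PySem.List.sorted s.toList (fun c => c) false)
  else
    let l := s.toList
    let temp := l ++ l
    let min_ := (PySem.List.pyRange 0 (l.length : Int) 1).foldl
      (fun m i => min m (PySem.List.slice temp (some i) (some (i + (l.length : Int))))) l
    String.ofList min_

-- ===== PORT B =====
-- s[(i + p) % n]: the index is always in range at every call site, so getD is exact
def pvCharAt (l : List Char) (i p : Nat) : Char := l.getD ((i + p) % l.length) ' '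

-- one iteration of B's loop body: m = min(s[(i+p)%n] for i in cand); cand = [i for i in cand if …== m]
def pvStep (l : List Char) (cand : List Nat) (p : Nat) : List Nat :=
  match PySem.List.min? (cand.map (fun i => pvCharAt l i p)) (fun c => c) with
  | none => cand        -- unreachable: cand is never empty
  | some m => cand.filter (fun i => pvCharAt l i p == m)

def orderlyQueue_alt (s : String) (k : Int) : String :=
  if k ≠ 1 then
    String.ofList (PySem.List.sorted s.toList (fun c => c) false)
  else
    let l := s.toList
    let n := l.length
    if n = 0 then s
    else
      let cand := (List.range n).foldl (pvStep l) (List.range n)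
      match cand with
      | [] => s         -- unreachable: cand is never empty
      | i :: _ => String.ofList (l.drop i ++ l.take i)

-- ===== PRECONDITION & SPEC =====
def Spec_orderlyQueue (s : String) (k : Int) (out : String) : Prop := out = orderlyQueue_alt s k
instance (s : String) (k : Int) (out : String) : Decidable (Spec_orderlyQueue s k out) := by unfold Spec_orderlyQueue; infer_instance

-- ===== CLAIM (what is proved, stated in full; the proofs are below) =====
def Claim_equal_orderlyQueue : Prop := ∀ (s : String) (k : Int), Dom_orderlyQueue s k → Spec_orderlyQueue s k (orderlyQueue s k)

-- ===== LEMMAS AND PROOFS =====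

-- the rotation of l by j (proof-side name for what both ports compute)
def pvRot (l : List Char) (j : Nat) : List Char := l.drop j ++ l.take j

-- the first q characters of the rotation starting at j
def pvPref (l : List Char) (j q : Nat) : List Char := (l.rotate j).take q

-- the indices of the prefix-minimal rotations after q refinement rounds
def pvCandSpec (l : List Char) (q : Nat) : List Nat :=
  (List.range l.length).filter
    (fun j => decide (∀ i ∈ List.range l.length, pvPref l j q ≤ pvPref l i q))

-- instance bridges: the ports elaborate min? with the default LT/DecidableLT instances,
-- the PySem order lemmas are stated for the LinearOrder ones; the instances agree.
theorem pvBridgeL (xs : List (List Char)) :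
    (PySem.List.min? xs (fun x => x))
      = @PySem.List.min? _ _ ((inferInstance : LinearOrder (List Char)).toLT) LinearOrder.toDecidableLT xs (fun x => x) := by
  congr 1

theorem pvBridgeK (xs : List Nat) (key : Nat → List Char) :
    (PySem.List.min? xs key)
      = @PySem.List.min? _ _ ((inferInstance : LinearOrder (List Char)).toLT) LinearOrder.toDecidableLT xs key := by
  congr 1

theorem pvIsMinL {xs : List (List Char)} {m : List Char}
    (h : PySem.List.min? xs (fun x => x) = some m) :
    ∀ y ∈ xs, m ≤ y := by
  rw [pvBridgeL] at h
  exact fun y hy => PySem.List.min?_isMin (key := fun x => x) h y hy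

theorem pvIsMinK {xs : List Nat} {key : Nat → List Char} {m : Nat}
    (h : PySem.List.min? xs key = some m) :
    ∀ y ∈ xs, key m ≤ key y := by
  rw [pvBridgeK] at h
  exact fun y hy => PySem.List.min?_isMin h y hy

theorem pvMemK {xs : List Nat} {key : Nat → List Char} {m : Nat}
    (h : PySem.List.min? xs key = some m) : m ∈ xs := PySem.List.min?_mem h

theorem pvIdCons (x : List Char) (t : List (List Char)) :
    PySem.List.min? (x :: t) (fun y => y) = some (List.foldl min x t) := by
  rw [pvBridgeL]
  exact PySem.List.min?_id_cons x t

theorem pvPyRange_eq_map_range (n : Nat) :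
    PySem.List.pyRange 0 (n : Int) 1 = (List.range n).map (Nat.cast : Nat → Int) := by
  induction n with
  | zero =>
    have h : PySem.List.pyRange (0 : Int) 0 1 = [] :=
      List.length_eq_zero_iff.mp (by simp)
    simp [h]
  | succ n ih =>
    have hsplit := PySem.List.pyRange_one_append 0 (n : Int) ((n : Int) + 1)
      (by positivity) (by omega)
    have hlast : PySem.List.pyRange (n : Int) ((n : Int) + 1) 1
        = [(n : Int)] := by
      rw [PySem.List.pyRange_one_cons (by omega)]
      have h : PySem.List.pyRange ((n : Int) + 1) ((n : Int) + 1) 1 = [] :=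
        List.length_eq_zero_iff.mp (by simp)
      simp [h]
    rw [show ((n + 1 : Nat) : Int) = ((n : Int) + 1) by omega,
      hsplit, hlast, ih, List.range_succ]
    simp

theorem pvSlice_double (l : List Char) (j : Nat) (h : j ≤ l.length) :
    PySem.List.slice (l ++ l) (some (j : Int)) (some ((j : Int) + (l.length : Int)))
      = pvRot l j := by
  rw [PySem.List.slice_natCast_add, pvRot]
  rw [List.drop_append_of_le_length h]
  rw [show l.length = (l.drop j).length + j by simp; omega, List.take_append]
  simp

-- ---- lexicographic order on equal-length lists of characters ----

theorem pvLex_append {x y : List Char} (u v : List Char)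
    (hlen : x.length = y.length) (h : x < y) : x ++ u < y ++ v := by
  induction x generalizing y with
  | nil =>
    cases y with
    | nil => exact absurd h (lt_irrefl _)
    | cons b ys => simp at hlen
  | cons a xs ih =>
    cases y with
    | nil => simp at hlen
    | cons b ys =>
      rcases List.cons_lt_cons_iff.mp h with hab | ⟨hab, hxy⟩
      · exact List.cons_lt_cons_iff.mpr (Or.inl hab)
      · subst hab
        exact List.cons_lt_cons_iff.mpr
          (Or.inr ⟨rfl, ih (by simpa using hlen) hxy⟩)

theorem pvAppend_singleton_lt (x : List Char) (a b : Char) :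
    x ++ [a] < x ++ [b] ↔ a < b := by
  induction x with
  | nil => simp [List.cons_lt_cons_iff]
  | cons c t ih => simp [ih]

theorem pvAppend_singleton_le (x : List Char) (a b : Char) :
    x ++ [a] ≤ x ++ [b] ↔ a ≤ b := by
  rw [← not_lt, ← not_lt, pvAppend_singleton_lt]

theorem pvTake_le {x y : List Char} (q : Nat) (hlen : x.length = y.length)
    (h : x ≤ y) : x.take q ≤ y.take q := by
  by_contra hq
  have hlt : y.take q < x.take q := not_le.mp hq
  have : y < x := by
    calc y = y.take q ++ y.drop q := (List.take_append_drop q y).symm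
      _ < x.take q ++ x.drop q := pvLex_append _ _ (by simp [hlen]) hlt
      _ = x := List.take_append_drop q x
  exact absurd h (not_le.mpr this)

-- ---- prefix facts ----

theorem pvPref_length (l : List Char) (j q : Nat) (h : q ≤ l.length) :
    (pvPref l j q).length = q := by
  simp [pvPref, List.length_take, List.length_rotate]
  omega

theorem pvCharAt_eq (l : List Char) (j q : Nat) (hq : q < l.length) :
    pvCharAt l j q = (l.rotate j)[q]'(by simpa using hq) := by
  rw [pvCharAt, List.getElem_rotate, Nat.add_comm q j]
  have hmod : (j + q) % l.length < l.length := Nat.mod_lt _ (by omega)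
  rw [List.getD_eq_getElem l ' ' hmod]

theorem pvPref_succ (l : List Char) (j q : Nat) (hq : q < l.length) :
    pvPref l j (q + 1) = pvPref l j q ++ [pvCharAt l j q] := by
  rw [pvPref, pvPref, List.take_add_one, pvCharAt_eq l j q hq,
    List.getElem?_eq_getElem (by simpa using hq)]
  rfl

theorem pvPref_full (l : List Char) (j : Nat) :
    pvPref l j l.length = l.rotate j := by
  rw [pvPref]
  exact List.take_of_length_le (by simp)

-- members of pvCandSpec have equal prefixes, nonmembers have strictly larger prefixes
theorem pvCand_mem (l : List Char) (q j : Nat) :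
    j ∈ pvCandSpec l q ↔
      j ∈ List.range l.length ∧ ∀ i ∈ List.range l.length, pvPref l j q ≤ pvPref l i q := by
  simp [pvCandSpec, List.mem_filter]

theorem pvCand_eq_pref {l : List Char} {q i j : Nat}
    (hi : i ∈ pvCandSpec l q) (hj : j ∈ pvCandSpec l q) :
    pvPref l i q = pvPref l j q := by
  rcases (pvCand_mem l q i).mp hi with ⟨hi1, hi2⟩
  rcases (pvCand_mem l q j).mp hj with ⟨hj1, hj2⟩
  exact le_antisymm (hi2 j hj1) (hj2 i hi1)

theorem pvCand_lt_pref {l : List Char} {q i j : Nat}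
    (hi : i ∈ pvCandSpec l q) (hj1 : j ∈ List.range l.length)
    (hj : j ∉ pvCandSpec l q) : pvPref l i q < pvPref l j q := by
  rcases (pvCand_mem l q i).mp hi with ⟨hi1, hi2⟩
  refine lt_of_le_of_ne (hi2 j hj1) (fun heq => hj ?_)
  exact (pvCand_mem l q j).mpr ⟨hj1, fun i' hi' => heq ▸ hi2 i' hi'⟩

theorem pvCand_ne_nil (l : List Char) (hl : l ≠ []) (q : Nat) :
    pvCandSpec l q ≠ [] := by
  have hn : 0 < l.length := List.length_pos_iff.mpr hl
  have hrange : List.range l.length ≠ [] := by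
    intro h
    have := List.length_range (n := l.length)
    rw [h] at this
    simp at this
    omega
  obtain ⟨j0, hj0⟩ : ∃ j0, PySem.List.min? (List.range l.length) (fun j => pvPref l j q) = some j0 := by
    cases hmc : PySem.List.min? (List.range l.length) (fun j => pvPref l j q) with
    | none =>
      exact absurd ((PySem.List.min?_eq_none_iff _ _).mp hmc) hrange
    | some j0 => exact ⟨j0, rfl⟩
  intro h
  have : j0 ∈ pvCandSpec l q :=
    (pvCand_mem l q j0).mpr ⟨pvMemK hj0, fun i hi => pvIsMinK hj0 i hi⟩
  rw [h] at this
  exact absurd this (List.not_mem_nil)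

-- one refinement round turns the q-prefix-minimal index list into the (q+1)-prefix-minimal one
theorem pvStep_spec (l : List Char) (hl : l ≠ []) (q : Nat) (hq : q < l.length) :
    pvStep l (pvCandSpec l q) q = pvCandSpec l (q + 1) := by
  have hn : 0 < l.length := List.length_pos_iff.mpr hl
  -- the minimum character over the candidates exists
  have hcne : pvCandSpec l q ≠ [] := pvCand_ne_nil l hl q
  obtain ⟨m, hm⟩ : ∃ m, PySem.List.min?
      ((pvCandSpec l q).map (fun i => pvCharAt l i q)) (fun c => c) = some m := by
    cases hmc : PySem.List.min? ((pvCandSpec l q).map (fun i => pvCharAt l i q)) (fun c => c) with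
    | none =>
      have := (PySem.List.min?_eq_none_iff _ _).mp hmc
      simp only [List.map_eq_nil_iff] at this
      exact absurd this hcne
    | some m => exact ⟨m, rfl⟩
  have hmmin : ∀ i ∈ pvCandSpec l q, m ≤ pvCharAt l i q := by
    intro i hi
    exact PySem.List.min?_isMin (key := fun c => c) hm _ (List.mem_map.mpr ⟨i, hi, rfl⟩)
  obtain ⟨jm, hjm, hjmc⟩ : ∃ jm ∈ pvCandSpec l q, pvCharAt l jm q = m := by
    rcases List.mem_map.mp (PySem.List.min?_mem hm) with ⟨jm, h1, h2⟩
    exact ⟨jm, h1, h2⟩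
  -- both sides are filters of List.range l.length
  rw [pvStep, hm]
  show (pvCandSpec l q).filter (fun i => pvCharAt l i q == m) = pvCandSpec l (q+1)
  rw [pvCandSpec, List.filter_filter, pvCandSpec]
  apply List.filter_congr
  intro j hjr
  simp only [beq_iff_eq, decide_eq_true_eq, Bool.and_eq_decide,
    decide_eq_decide]
  constructor
  · rintro ⟨hch, hminq⟩
    have hj : j ∈ pvCandSpec l q := (pvCand_mem l q j).mpr ⟨hjr, hminq⟩
    intro i hir
    rw [pvPref_succ l j q hq, pvPref_succ l i q hq]
    by_cases hi : i ∈ pvCandSpec l q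
    · rw [pvCand_eq_pref hj hi, hch]
      exact (pvAppend_singleton_le _ _ _).mpr (hmmin i hi)
    · exact le_of_lt (pvLex_append _ _
        (by rw [pvPref_length l j q (le_of_lt hq), pvPref_length l i q (le_of_lt hq)])
        (pvCand_lt_pref hj hir hi))
  · intro hmin1
    have hminq : ∀ i ∈ List.range l.length, pvPref l j q ≤ pvPref l i q := by
      intro i hir
      have h := pvTake_le q (by rw [pvPref_length l j (q+1) hq, pvPref_length l i (q+1) hq])
        (hmin1 i hir)
      simp only [pvPref] at h ⊢
      rwa [List.take_take, List.take_take, Nat.min_eq_left (Nat.le_succ q)] at h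
    have hj : j ∈ pvCandSpec l q := (pvCand_mem l q j).mpr ⟨hjr, hminq⟩
    refine ⟨?_, hminq⟩
    -- char at q equals the minimum m
    have h1 : m ≤ pvCharAt l j q := hmmin j hj
    have h2 : pvCharAt l j q ≤ m := by
      have hle := hmin1 jm ((pvCand_mem l q jm).mp hjm).1
      rw [pvPref_succ l j q hq, pvPref_succ l jm q hq, pvCand_eq_pref hj hjm, hjmc] at hle
      exact (pvAppend_singleton_le _ _ _).mp hle
    exact le_antisymm h2 h1

-- the loop invariant, by induction over the rounds
theorem pvInv (l : List Char) (hl : l ≠ []) :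
    ∀ q, q ≤ l.length →
      (List.range q).foldl (pvStep l) (List.range l.length) = pvCandSpec l q := by
  intro q
  induction q with
  | zero =>
    intro _
    simp only [List.range_zero, List.foldl_nil, pvCandSpec]
    refine (List.filter_eq_self.mpr fun j _ => ?_).symm
    simp [pvPref]
  | succ q ih =>
    intro hq1
    rw [List.range_succ, List.foldl_append, ih (by omega), List.foldl_cons, List.foldl_nil]
    exact pvStep_spec l hl q (by omega)

-- ===== VERDICT (by name: the statement is the Claim_ definition above) =====
theorem orderlyQueue_spec : Claim_equal_orderlyQueue := by
  intro s k _
  show orderlyQueue s k = orderlyQueue_alt s k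
  by_cases hk : k ≠ 1
  · simp [orderlyQueue, orderlyQueue_alt, hk]
  · simp only [orderlyQueue, orderlyQueue_alt, if_neg hk]
    by_cases hnil : s.toList = []
    · have h0 : PySem.List.pyRange 0 ((s.toList.length : Int)) 1 = [] := by
        rw [hnil]
        exact List.length_eq_zero_iff.mp (by simp)
      rw [h0, List.foldl_nil, hnil]
      simp only [List.length_nil, if_true]
      have := congrArg String.ofList hnil
      simpa using this
    · set l := s.toList with hldef
      have hn : 0 < l.length := List.length_pos_iff.mpr hnil
      -- A's loop is the running minimum over all rotations
      have hAfold : (PySem.List.pyRange 0 (l.length : Int) 1).foldl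
          (fun m i => min m (PySem.List.slice (l ++ l) (some i) (some (i + (l.length : Int))))) l
          = List.foldl min l ((List.range l.length).map (pvRot l)) := by
        calc (PySem.List.pyRange 0 (l.length : Int) 1).foldl
              (fun m i => min m (PySem.List.slice (l ++ l) (some i) (some (i + (l.length : Int))))) l
            = (List.range l.length).foldl
              (fun m (j : Nat) => min m (PySem.List.slice (l ++ l) (some (j : Int)) (some ((j : Int) + (l.length : Int))))) l := by
              rw [pvPyRange_eq_map_range, List.foldl_map]
          _ = (List.range l.length).foldl (fun m j => min m (pvRot l j)) l :=
              PySem.List.foldl_congr_mem _ _ _ _ (fun acc j hj => by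
                rw [pvSlice_double l j (le_of_lt (List.mem_range.mp hj))])
          _ = List.foldl min l ((List.range l.length).map (pvRot l)) := (List.foldl_map).symm
      have hA : PySem.List.min? (l :: (List.range l.length).map (pvRot l)) (fun x => x)
          = some (List.foldl min l ((List.range l.length).map (pvRot l))) :=
        pvIdCons l _
      have hAmem : List.foldl min l ((List.range l.length).map (pvRot l))
          ∈ l :: (List.range l.length).map (pvRot l) := PySem.List.min?_mem hA
      have hAmin : ∀ y ∈ l :: (List.range l.length).map (pvRot l),
          List.foldl min l ((List.range l.length).map (pvRot l)) ≤ y := pvIsMinL hA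
      -- B's loop: the surviving candidates are the minimal rotations' start indices
      have hcand : (List.range l.length).foldl (pvStep l) (List.range l.length)
          = pvCandSpec l l.length := pvInv l hnil l.length (le_refl _)
      have hcne : pvCandSpec l l.length ≠ [] := pvCand_ne_nil l hnil l.length
      rw [hAfold, if_neg (by omega : ¬ l.length = 0), hcand]
      cases hcs : pvCandSpec l l.length with
      | nil => exact absurd hcs hcne
      | cons i0 rest =>
        have hi0 : i0 ∈ pvCandSpec l l.length := by rw [hcs]; exact List.mem_cons_self
        rcases (pvCand_mem l l.length i0).mp hi0 with ⟨hi0r, hi0min⟩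
        have hi0n : i0 < l.length := List.mem_range.mp hi0r
        have hrot : ∀ j, j < l.length → l.rotate j = pvRot l j := fun j hj =>
          List.rotate_eq_drop_append_take (le_of_lt hj)
        have hle1 : List.foldl min l ((List.range l.length).map (pvRot l)) ≤ pvRot l i0 :=
          hAmin _ (List.mem_cons.mpr (Or.inr (List.mem_map.mpr ⟨i0, hi0r, rfl⟩)))
        have hmin' : ∀ j, j < l.length → pvRot l i0 ≤ pvRot l j := by
          intro j hj
          have := hi0min j (List.mem_range.mpr hj)
          rwa [pvPref_full, pvPref_full, hrot i0 hi0n, hrot j hj] at this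
        have hle2 : pvRot l i0 ≤ List.foldl min l ((List.range l.length).map (pvRot l)) := by
          rcases List.mem_cons.mp hAmem with h | h
          · rw [h]
            have := hmin' 0 hn
            simpa [pvRot] using this
          · rcases List.mem_map.mp h with ⟨j, hjr, hjrot⟩
            rw [← hjrot]
            exact hmin' j (List.mem_range.mp hjr)
        show String.ofList (List.foldl min l ((List.range l.length).map (pvRot l)))
          = String.ofList (l.drop i0 ++ l.take i0)
        rw [← le_antisymm hle2 hle1, pvRot]
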